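-- pv_equiv track=rewrite | github.com/Shanthan2307/Trinetra_1 | backend/CCTV/cctv_analyzer.py | is_direct_stream
-- ===== SOURCE A (Python) =====
-- def is_direct_stream(url):
--     """Check if URL is a direct video stream"""
--     stream_extensions = ['.m3u8', '.mpd', '.ts', '.mp4', '.flv', '.mjpeg', '.mjpg']
--     stream_protocols = ['rtsp://', 'rtmp://', 'mms://', 'mmsh://']
--
--     url_lower = url.lower()
--
--     # Check for stream protocols
--     for protocol in stream_protocols:
--         if url_lower.startswith(protocol):
--             return True
--
--     # Check for stream extensions
--     for ext in stream_extensions: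
--         if ext in url_lower:
--             return True
--
--     return False
-- ===== SOURCE B (Python) =====
-- def is_direct_stream(url):
--     """Check if URL is a direct video stream"""
--     s = url.lower()
--     # parse out the scheme once and compare it against the streaming schemes
--     i = s.find('://')
--     if i != -1 and s[:i] in ('rtsp', 'rtmp', 'mms', 'mmsh'):
--         return True
--     # split on dots once: a streaming extension is present iff some piece
--     # following a dot begins with one of the extension names
--     names = ('m3u8', 'mpd', 'ts', 'mp4', 'flv', 'mjpeg', 'mjpg')
--     return any(seg.startswith(names) for seg in s.split('.')[1:])
-- ===== Notes on version B (the rewrite author's own statement) =====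
-- stated objective: alternative
-- what changed: Instead of A's per-pattern scans (a prefix test per protocol, a substring search per extension), B parses the URL once: it extracts the scheme preceding the first protocol separator and compares it against the scheme set, and splits the string on dots once, testing whether any piece after a dot begins with an extension name.
import Mathlib
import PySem

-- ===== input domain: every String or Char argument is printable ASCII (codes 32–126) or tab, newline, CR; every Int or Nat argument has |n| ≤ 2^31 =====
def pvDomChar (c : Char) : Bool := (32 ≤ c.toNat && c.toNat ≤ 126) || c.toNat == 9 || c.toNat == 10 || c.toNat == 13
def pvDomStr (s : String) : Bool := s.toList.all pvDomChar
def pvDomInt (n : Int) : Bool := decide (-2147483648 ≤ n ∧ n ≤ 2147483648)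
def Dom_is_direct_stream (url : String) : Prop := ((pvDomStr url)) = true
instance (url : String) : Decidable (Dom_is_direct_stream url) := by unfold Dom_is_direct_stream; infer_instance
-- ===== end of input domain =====

-- B parses the URL once (the scheme before the protocol separator compared against a set; split on dots
-- and test segment heads) instead of A's per-pattern prefix tests and substring scans; alternative, same behaviour.

-- ===== PORT A =====
-- literal transliteration: try each protocol as a prefix, then each extension as a substring (early-return loops = List.any)
def is_direct_stream (url : String) : Bool :=
  let url_lower := PySem.Str.lower url
  if ["rtsp://", "rtmp://", "mms://", "mmsh://"].any (fun p => PySem.Str.startswith url_lower p) then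
    true
  else if [".m3u8", ".mpd", ".ts", ".mp4", ".flv", ".mjpeg", ".mjpg"].any
      (fun ext => PySem.Str.isIn ext url_lower) then
    true
  else
    false

-- ===== PORT B =====
-- literal transliteration of Source B: i = s.find('://'); scheme check s[:i] in (...); then
-- any(seg.startswith(names) for seg in s.split('.')[1:]).  s.split('.') = split? with the
-- literal non-empty separator ".", so the Option is always some; .getD [] extracts it.
def is_direct_stream_alt (url : String) : Bool :=
  let s := PySem.Str.lower url
  let i := PySem.Str.find s "://"
  if i ≠ -1 ∧ ["rtsp", "rtmp", "mms", "mmsh"].contains (PySem.Str.slice s none (some i)) then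
    true
  else
    (((PySem.Str.split? s ".").getD []).drop 1).any (fun seg =>
      ["m3u8", "mpd", "ts", "mp4", "flv", "mjpeg", "mjpg"].any
        (fun nm => PySem.Str.startswith seg nm))

-- ===== PRECONDITION & SPEC =====
def Spec_is_direct_stream (url : String) (out : Bool) : Prop := out = is_direct_stream_alt url
instance (url : String) (out : Bool) : Decidable (Spec_is_direct_stream url out) := by unfold Spec_is_direct_stream; infer_instance

-- ===== CLAIM (what is proved, stated in full; the proofs are below) =====
def Claim_equal_is_direct_stream : Prop := ∀ (url : String), Dom_is_direct_stream url → Spec_is_direct_stream url (is_direct_stream url)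

-- ===== LEMMAS AND PROOFS =====

-- ## Scheme side: 'nm://' is a prefix of t iff find locates '://' exactly at nm.length and t starts with nm.
theorem find_scheme_iff (nm t : List Char) (hnm : ':' ∉ nm) :
    (nm ++ [':', '/', '/']) <+: t ↔
      (0 ≤ PySem.Chars.find t [':', '/', '/'] ∧
        t.take (PySem.Chars.find t [':', '/', '/']).toNat = nm) := by
  constructor
  · rintro ⟨rest, rfl⟩
    have h0 : 0 ≤ PySem.Chars.find (nm ++ [':', '/', '/'] ++ rest) [':', '/', '/'] := by
      rw [PySem.Chars.find_nonneg_iff]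
      exact ⟨nm, rest, rfl⟩
    obtain ⟨hpre, hmin⟩ := PySem.Chars.find_spec h0
    have hk : (PySem.Chars.find (nm ++ [':', '/', '/'] ++ rest) [':', '/', '/']).toNat = nm.length := by
      rcases lt_trichotomy (PySem.Chars.find (nm ++ [':', '/', '/'] ++ rest) [':', '/', '/']).toNat nm.length with hlt | heq | hgt
      · exfalso
        obtain ⟨u, hu⟩ := hpre
        have hhead : ((nm ++ [':', '/', '/'] ++ rest).drop
            (PySem.Chars.find (nm ++ [':', '/', '/'] ++ rest) [':', '/', '/']).toNat).head? = some ':' := by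
          rw [← hu]; rfl
        rw [List.head?_drop,
          List.getElem?_append_left (by simp only [List.length_append]; omega),
          List.getElem?_append_left hlt] at hhead
        exact hnm (List.mem_of_getElem? hhead)
      · exact heq
      · exfalso
        exact hmin nm.length hgt ⟨rest, by simp⟩
    refine ⟨h0, ?_⟩
    rw [hk, List.append_assoc, List.take_left']
    rfl
  · rintro ⟨h0, htake⟩
    obtain ⟨hpre, -⟩ := PySem.Chars.find_spec h0
    obtain ⟨rest, hrest⟩ := hpre
    exact ⟨rest, by rw [List.append_assoc, ← htake, hrest, List.take_append_drop]⟩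

-- pointwise lift of find_scheme_iff to a list of ':'-free scheme names
theorem proto_equiv (schemes : List (List Char)) (t : List Char)
    (hfree : ∀ nm ∈ schemes, ':' ∉ nm) :
    (∃ nm ∈ schemes, (nm ++ [':', '/', '/']) <+: t) ↔
      (0 ≤ PySem.Chars.find t [':', '/', '/'] ∧
        t.take (PySem.Chars.find t [':', '/', '/']).toNat ∈ schemes) := by
  constructor
  · rintro ⟨nm, hmem, hp⟩
    obtain ⟨h0, htake⟩ := (find_scheme_iff nm t (hfree nm hmem)).mp hp
    exact ⟨h0, htake ▸ hmem⟩
  · rintro ⟨h0, hmem⟩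
    exact ⟨_, hmem, (find_scheme_iff _ t (hfree _ hmem)).mpr ⟨h0, rfl⟩⟩

-- ## Extension side: a clean recursion computing s.split('.') (proved equal to the port's splitOn below)
def dotSplit : List Char → List (List Char)
  | [] => [[]]
  | c :: rest => if c = '.' then [] :: dotSplit rest else (dotSplit rest).modifyHead (c :: ·)

theorem dotSplit_ne_nil (t : List Char) : dotSplit t ≠ [] := by
  induction t with
  | nil => simp [dotSplit]
  | cons c rest ih =>
    simp only [dotSplit]
    split
    · simp
    · intro h
      exact ih (by simpa using congrArg List.length h)

theorem go_spec (fuel : Nat) : ∀ (l cur : List Char) (acc : List (List Char)), l.length < fuel →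
    PySem.Chars.splitOn.go ['.'] fuel l cur acc
      = acc.reverse ++ (dotSplit l).modifyHead (cur.reverse ++ ·) := by
  induction fuel with
  | zero => intro l cur acc h; omega
  | succ n ih =>
    intro l cur acc h
    match l with
    | [] => simp [PySem.Chars.splitOn.go, dotSplit]
    | c :: rest =>
      by_cases hc : c = '.'
      · subst hc
        rw [show PySem.Chars.splitOn.go ['.'] (n+1) ('.' :: rest) cur acc
              = PySem.Chars.splitOn.go ['.'] n (List.drop 1 ('.' :: rest)) [] (cur.reverse :: acc) by
            simp [PySem.Chars.splitOn.go, List.isPrefixOf]]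
        rw [List.drop_one, List.tail_cons, ih rest [] (cur.reverse :: acc) (by simpa using h)]
        simp only [dotSplit, if_true, List.reverse_cons, List.reverse_nil,
          List.nil_append]
        obtain ⟨hd, tl, hds⟩ := List.exists_cons_of_ne_nil (dotSplit_ne_nil rest)
        simp [hds]
      · rw [show PySem.Chars.splitOn.go ['.'] (n+1) (c :: rest) cur acc
              = PySem.Chars.splitOn.go ['.'] n rest (c :: cur) acc by
            simp [PySem.Chars.splitOn.go, List.isPrefixOf, Ne.symm hc]]
        rw [ih rest (c :: cur) acc (by simpa using h)]
        simp only [dotSplit, if_neg hc, List.modifyHead_modifyHead, List.reverse_cons]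
        obtain ⟨hd, tl, hds⟩ := List.exists_cons_of_ne_nil (dotSplit_ne_nil rest)
        simp [hds]

theorem splitOn_dot (t : List Char) : PySem.Chars.splitOn t ['.'] = dotSplit t := by
  unfold PySem.Chars.splitOn
  rw [go_spec (t.length + 1) t [] [] (by omega)]
  obtain ⟨hd, tl, hds⟩ := List.exists_cons_of_ne_nil (dotSplit_ne_nil t)
  simp [hds]

-- a '.'-free nm is a prefix of the FIRST dot-segment of t iff it is a prefix of t itself
theorem head_dotSplit (t : List Char) : ∀ (nm : List Char), '.' ∉ nm →
    (nm <+: (dotSplit t).headI ↔ nm <+: t) := by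
  induction t with
  | nil => intro nm _; simp [dotSplit]
  | cons c rest ih =>
    intro nm hnm
    by_cases hc : c = '.'
    · subst hc
      simp only [dotSplit, if_true, List.headI_cons]
      rw [List.prefix_nil, List.prefix_cons_iff]
      constructor
      · rintro rfl; exact Or.inl rfl
      · rintro (rfl | ⟨u, rfl, -⟩)
        · rfl
        · exact absurd (List.mem_cons_self ..) hnm
    · simp only [dotSplit, if_neg hc]
      obtain ⟨hd, tl, hds⟩ := List.exists_cons_of_ne_nil (dotSplit_ne_nil rest)
      rw [hds, List.modifyHead_cons, List.headI_cons, List.prefix_cons_iff, List.prefix_cons_iff]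
      constructor
      · rintro (rfl | ⟨u, rfl, hu⟩)
        · exact Or.inl rfl
        · refine Or.inr ⟨u, rfl, ?_⟩
          have := (ih u (fun h => hnm (List.mem_cons_of_mem _ h)))
          rw [hds, List.headI_cons] at this
          exact this.mp hu
      · rintro (rfl | ⟨u, rfl, hu⟩)
        · exact Or.inl rfl
        · refine Or.inr ⟨u, rfl, ?_⟩
          have := (ih u (fun h => hnm (List.mem_cons_of_mem _ h)))
          rw [hds, List.headI_cons] at this
          exact this.mpr hu

-- '.nm' occurs in t iff nm starts one of the dot-segments after the first
theorem tail_dotSplit (nm : List Char) (h2 : '.' ∉ nm) :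
    ∀ (t : List Char), ((∃ seg ∈ (dotSplit t).tail, nm <+: seg) ↔ ('.' :: nm) <:+: t) := by
  intro t
  induction t with
  | nil => simp [dotSplit]
  | cons c rest ih =>
    obtain ⟨hd, tl, hds⟩ := List.exists_cons_of_ne_nil (dotSplit_ne_nil rest)
    have hh : nm <+: hd ↔ nm <+: rest := by
      have := head_dotSplit rest nm h2
      rwa [hds, List.headI_cons] at this
    rw [hds, List.tail_cons] at ih
    by_cases hc : c = '.'
    · subst hc
      simp only [dotSplit, if_true, List.tail_cons]
      rw [List.infix_cons_iff, List.cons_prefix_cons, hds]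
      constructor
      · rintro ⟨seg, hseg, hp⟩
        rcases List.mem_cons.mp hseg with rfl | hseg
        · exact Or.inl ⟨rfl, hh.mp hp⟩
        · exact Or.inr (ih.mp ⟨seg, hseg, hp⟩)
      · rintro (⟨-, hp⟩ | hin)
        · exact ⟨hd, List.mem_cons_self .., hh.mpr hp⟩
        · obtain ⟨seg, hseg, hp⟩ := ih.mpr hin
          exact ⟨seg, List.mem_cons_of_mem _ hseg, hp⟩
    · simp only [dotSplit, if_neg hc]
      rw [hds, List.modifyHead_cons, List.tail_cons, List.infix_cons_iff, List.cons_prefix_cons]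
      constructor
      · intro h
        exact Or.inr (ih.mp h)
      · rintro (⟨h, -⟩ | hin)
        · exact absurd h.symm hc
        · exact ih.mpr hin

-- ## Assembly on List Char: the two extension checks agree
theorem cond2_iff (t : List Char) :
    ([".m3u8", ".mpd", ".ts", ".mp4", ".flv", ".mjpeg", ".mjpg"].any
        (fun ext => PySem.Chars.isIn ext.toList t))
      = ((PySem.Chars.splitOn t ['.']).drop 1).any (fun seg =>
          ["m3u8", "mpd", "ts", "mp4", "flv", "mjpeg", "mjpg"].any
            (fun nm => PySem.Chars.startswith seg nm.toList)) := by
  rw [Bool.eq_iff_iff]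
  simp only [List.any_eq_true, PySem.Chars.isIn_iff_infix, PySem.Chars.startswith_iff,
    splitOn_dot, List.drop_one, List.mem_cons, List.not_mem_nil, or_false]
  constructor
  · rintro ⟨e, he, hin⟩
    rcases he with rfl | rfl | rfl | rfl | rfl | rfl | rfl
    · obtain ⟨seg, hseg, hp⟩ := (tail_dotSplit "m3u8".toList (by decide) t).mpr (by exact hin)
      exact ⟨seg, hseg, "m3u8", Or.inl rfl, hp⟩
    · obtain ⟨seg, hseg, hp⟩ := (tail_dotSplit "mpd".toList (by decide) t).mpr (by exact hin)
      exact ⟨seg, hseg, "mpd", Or.inr (Or.inl rfl), hp⟩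
    · obtain ⟨seg, hseg, hp⟩ := (tail_dotSplit "ts".toList (by decide) t).mpr (by exact hin)
      exact ⟨seg, hseg, "ts", Or.inr (Or.inr (Or.inl rfl)), hp⟩
    · obtain ⟨seg, hseg, hp⟩ := (tail_dotSplit "mp4".toList (by decide) t).mpr (by exact hin)
      exact ⟨seg, hseg, "mp4", Or.inr (Or.inr (Or.inr (Or.inl rfl))), hp⟩
    · obtain ⟨seg, hseg, hp⟩ := (tail_dotSplit "flv".toList (by decide) t).mpr (by exact hin)
      exact ⟨seg, hseg, "flv", Or.inr (Or.inr (Or.inr (Or.inr (Or.inl rfl)))), hp⟩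
    · obtain ⟨seg, hseg, hp⟩ := (tail_dotSplit "mjpeg".toList (by decide) t).mpr (by exact hin)
      exact ⟨seg, hseg, "mjpeg", Or.inr (Or.inr (Or.inr (Or.inr (Or.inr (Or.inl rfl))))), hp⟩
    · obtain ⟨seg, hseg, hp⟩ := (tail_dotSplit "mjpg".toList (by decide) t).mpr (by exact hin)
      exact ⟨seg, hseg, "mjpg", Or.inr (Or.inr (Or.inr (Or.inr (Or.inr (Or.inr rfl))))), hp⟩
  · rintro ⟨seg, hseg, nm, hnm, hp⟩
    rcases hnm with rfl | rfl | rfl | rfl | rfl | rfl | rfl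
    · exact ⟨".m3u8", Or.inl rfl, (tail_dotSplit "m3u8".toList (by decide) t).mp ⟨seg, hseg, hp⟩⟩
    · exact ⟨".mpd", Or.inr (Or.inl rfl), (tail_dotSplit "mpd".toList (by decide) t).mp ⟨seg, hseg, hp⟩⟩
    · exact ⟨".ts", Or.inr (Or.inr (Or.inl rfl)), (tail_dotSplit "ts".toList (by decide) t).mp ⟨seg, hseg, hp⟩⟩
    · exact ⟨".mp4", Or.inr (Or.inr (Or.inr (Or.inl rfl))), (tail_dotSplit "mp4".toList (by decide) t).mp ⟨seg, hseg, hp⟩⟩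
    · exact ⟨".flv", Or.inr (Or.inr (Or.inr (Or.inr (Or.inl rfl)))), (tail_dotSplit "flv".toList (by decide) t).mp ⟨seg, hseg, hp⟩⟩
    · exact ⟨".mjpeg", Or.inr (Or.inr (Or.inr (Or.inr (Or.inr (Or.inl rfl))))), (tail_dotSplit "mjpeg".toList (by decide) t).mp ⟨seg, hseg, hp⟩⟩
    · exact ⟨".mjpg", Or.inr (Or.inr (Or.inr (Or.inr (Or.inr (Or.inr rfl))))), (tail_dotSplit "mjpg".toList (by decide) t).mp ⟨seg, hseg, hp⟩⟩

-- the two protocol checks agree (string level)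
theorem cond1_iff (s : String) :
    (["rtsp://", "rtmp://", "mms://", "mmsh://"].any (fun p => PySem.Str.startswith s p))
      = (decide (PySem.Str.find s "://" ≠ -1 ∧
          ["rtsp", "rtmp", "mms", "mmsh"].contains
            (PySem.Str.slice s none (some (PySem.Str.find s "://"))) = true)) := by
  rw [Bool.eq_iff_iff, decide_eq_true_iff]
  have hfind : PySem.Str.find s "://" = PySem.Chars.find s.toList [':', '/', '/'] := by
    simp [PySem.Str.find_eq]
  have hne : (PySem.Chars.find s.toList [':', '/', '/'] ≠ -1) ↔
      (0 ≤ PySem.Chars.find s.toList [':', '/', '/']) := by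
    have := PySem.Chars.neg_one_le_find s.toList [':', '/', '/']
    omega
  simp only [List.any_eq_true, PySem.Str.startswith_eq, PySem.Chars.startswith_iff,
    List.mem_cons, List.not_mem_nil, or_false, hfind, hne, List.contains_iff_mem]
  have key := proto_equiv ["rtsp".toList, "rtmp".toList, "mms".toList, "mmsh".toList] s.toList
    (by decide)
  simp only [List.mem_cons, List.not_mem_nil, or_false] at key
  constructor
  · rintro ⟨p, hp, hpre⟩
    have hmain : ∃ nm ∈ ["rtsp".toList, "rtmp".toList, "mms".toList, "mmsh".toList],
        (nm ++ [':', '/', '/']) <+: s.toList := by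
      rcases hp with rfl | rfl | rfl | rfl
      · exact ⟨"rtsp".toList, by simp, by exact hpre⟩
      · exact ⟨"rtmp".toList, by simp, by exact hpre⟩
      · exact ⟨"mms".toList, by simp, by exact hpre⟩
      · exact ⟨"mmsh".toList, by simp, by exact hpre⟩
    obtain ⟨h0, hmem⟩ := key.mp (by simpa using hmain)
    refine ⟨h0, ?_⟩
    have hslice : (PySem.Str.slice s none (some (PySem.Chars.find s.toList [':', '/', '/']))).toList
        = s.toList.take (PySem.Chars.find s.toList [':', '/', '/']).toNat := by
      simp [PySem.Str.slice, PySem.List.slice_to _ h0]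
    rcases hmem with h | h | h | h
    · exact Or.inl (String.toList_inj.mp (by rw [hslice, h]))
    · exact Or.inr (Or.inl (String.toList_inj.mp (by rw [hslice, h])))
    · exact Or.inr (Or.inr (Or.inl (String.toList_inj.mp (by rw [hslice, h]))))
    · exact Or.inr (Or.inr (Or.inr (String.toList_inj.mp (by rw [hslice, h]))))
  · rintro ⟨h0, hmem⟩
    have hslice : (PySem.Str.slice s none (some (PySem.Chars.find s.toList [':', '/', '/']))).toList
        = s.toList.take (PySem.Chars.find s.toList [':', '/', '/']).toNat := by
      simp [PySem.Str.slice, PySem.List.slice_to _ h0]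
    have hmem' : s.toList.take (PySem.Chars.find s.toList [':', '/', '/']).toNat
        ∈ ["rtsp".toList, "rtmp".toList, "mms".toList, "mmsh".toList] := by
      rcases hmem with h | h | h | h <;>
        simp [← hslice, h]
    obtain ⟨nm, hnm, hpre⟩ := key.mpr ⟨h0, by simpa using hmem'⟩
    rcases hnm with rfl | rfl | rfl | rfl
    · exact ⟨"rtsp://", by simp, by rw [show "rtsp://".toList = "rtsp".toList ++ [':', '/', '/'] from by decide]; exact hpre⟩
    · exact ⟨"rtmp://", by simp, by rw [show "rtmp://".toList = "rtmp".toList ++ [':', '/', '/'] from by decide]; exact hpre⟩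
    · exact ⟨"mms://", by simp, by rw [show "mms://".toList = "mms".toList ++ [':', '/', '/'] from by decide]; exact hpre⟩
    · exact ⟨"mmsh://", by simp, by rw [show "mmsh://".toList = "mmsh".toList ++ [':', '/', '/'] from by decide]; exact hpre⟩

-- ===== VERDICT (by name: the statement is the Claim_ definition above) =====
theorem is_direct_stream_spec : Claim_equal_is_direct_stream := by
  intro url _
  unfold Spec_is_direct_stream is_direct_stream is_direct_stream_alt
  set s := PySem.Str.lower url with hs
  have h1 := cond1_iff s
  have h2 : ([".m3u8", ".mpd", ".ts", ".mp4", ".flv", ".mjpeg", ".mjpg"].any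
        (fun ext => PySem.Str.isIn ext s))
      = (((PySem.Str.split? s ".").getD []).drop 1).any (fun seg =>
          ["m3u8", "mpd", "ts", "mp4", "flv", "mjpeg", "mjpg"].any
            (fun nm => PySem.Str.startswith seg nm)) := by
    have hsplit : (PySem.Str.split? s ".").getD []
        = (PySem.Chars.splitOn s.toList ['.']).map String.ofList := by
      rw [PySem.Str.split?, PySem.Chars.split?.eq_1]
      simp [show ".".toList = ['.'] from by decide]
    rw [hsplit, ← List.map_drop, List.any_map]
    simp only [PySem.Str.isIn_eq, PySem.Str.startswith_eq, Function.comp_def,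
      String.toList_ofList]
    exact cond2_iff s.toList
  by_cases hc1 : (["rtsp://", "rtmp://", "mms://", "mmsh://"].any (fun p => PySem.Str.startswith s p)) = true
  · rw [if_pos hc1]
    rw [hc1] at h1
    rw [if_pos (of_decide_eq_true h1.symm)]
  · rw [if_neg hc1]
    have : ¬ (PySem.Str.find s "://" ≠ -1 ∧
        ["rtsp", "rtmp", "mms", "mmsh"].contains
          (PySem.Str.slice s none (some (PySem.Str.find s "://"))) = true) := by
      intro h
      exact hc1 (h1 ▸ decide_eq_true h)
    rw [if_neg this]
    by_cases hc2 : ([".m3u8", ".mpd", ".ts", ".mp4", ".flv", ".mjpeg", ".mjpg"].any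
        (fun ext => PySem.Str.isIn ext s)) = true
    · rw [if_pos hc2, ← h2, hc2]
    · rw [if_neg hc2, ← h2]
      exact (Bool.not_eq_true _).mp hc2 |>.symm
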